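-- pv_equiv track=rewrite | github.com/paiml/depyler | examples/hard_sec_secret_share.py | xor_combine
-- ===== SOURCE A (Python) =====
-- from typing import List, Tuple
--
-- def xor_combine(shares: List[List[int]]) -> List[int]:
--     if len(shares) == 0:
--         return []
--     result: List[int] = []
--     for j in range(len(shares[0])):
--         val: int = 0
--         for i in range(len(shares)):
--             val = val ^ shares[i][j]
--         result.append(val)
--     return result
-- ===== SOURCE B (Python) =====
-- def xor_combine(shares):
--     if len(shares) == 0:
--         return []
--     acc = [shares[0][j] for j in range(len(shares[0]))]
--     for row in shares[1:]:
--         acc = [acc[j] ^ row[j] for j in range(len(acc))]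
--     return acc
-- ===== Notes on version B (the rewrite author's own statement) =====
-- stated objective: alternative
-- what changed: Replaces the column-major double loop (one inner scan over all shares per output position) with a row-major fold that keeps a running column-vector accumulator and XORs each share into it element-wise.
import Mathlib
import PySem

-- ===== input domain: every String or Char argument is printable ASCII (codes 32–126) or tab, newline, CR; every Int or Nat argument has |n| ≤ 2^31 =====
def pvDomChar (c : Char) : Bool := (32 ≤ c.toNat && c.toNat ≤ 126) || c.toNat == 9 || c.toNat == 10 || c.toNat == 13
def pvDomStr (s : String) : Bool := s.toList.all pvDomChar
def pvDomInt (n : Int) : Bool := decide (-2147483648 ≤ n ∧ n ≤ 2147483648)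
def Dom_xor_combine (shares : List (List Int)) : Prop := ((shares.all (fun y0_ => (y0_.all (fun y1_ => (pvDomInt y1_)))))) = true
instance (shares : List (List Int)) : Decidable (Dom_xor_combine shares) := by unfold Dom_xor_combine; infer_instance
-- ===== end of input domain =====

-- B replaces A's column-major double loop by a row-major fold over a running column-vector accumulator (alternative decomposition, same cost).


-- ===== PORT A =====
def xor_combine (shares : List (List Int)) : List Int :=
  if shares.length = 0 then []
  else
    (PySem.List.pyRange 0 (PySem.List.len (PySem.List.pyGetD shares 0 []))).foldl
      (fun result j =>
        result ++ [(PySem.List.pyRange 0 (PySem.List.len shares)).foldl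
          (fun val i => PySem.Int.bxor val (PySem.List.pyGetD (PySem.List.pyGetD shares i []) j 0)) 0])
      []

-- ===== PORT B =====
def xor_combine_alt (shares : List (List Int)) : List Int :=
  match shares with
  | [] => []
  | first :: rest =>
    rest.foldl
      (fun acc row =>
        (PySem.List.pyRange 0 (PySem.List.len acc)).map
          (fun j => PySem.Int.bxor (PySem.List.pyGetD acc j 0) (PySem.List.pyGetD row j 0)))
      ((PySem.List.pyRange 0 (PySem.List.len first)).map (fun j => PySem.List.pyGetD first j 0))

-- ===== PRECONDITION & SPEC =====
-- Pre_ excludes exactly the inputs where Python A raises IndexError: a later share shorter than the first.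
def Pre_xor_combine (shares : List (List Int)) : Prop :=
  ∀ s ∈ shares, (shares.headD []).length ≤ s.length
instance (shares : List (List Int)) : Decidable (Pre_xor_combine shares) := by unfold Pre_xor_combine; infer_instance
def pvWitness_xor_combine : List (List Int) := [[1, 2], [3, 4]]

def Spec_xor_combine (shares : List (List Int)) (out : List Int) : Prop := out = xor_combine_alt shares
instance (shares : List (List Int)) (out : List Int) : Decidable (Spec_xor_combine shares out) := by unfold Spec_xor_combine; infer_instance

-- ===== CLAIM (what is proved, stated in full; the proofs are below) =====
def Claim_equal_xor_combine : Prop := ∀ (shares : List (List Int)), Dom_xor_combine shares → Pre_xor_combine shares → Spec_xor_combine shares (xor_combine shares)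

-- ===== LEMMAS AND PROOFS =====

-- A's inner loop over i in range(len(shares)) is a fold over the rows themselves.
theorem xor_inner_eq (shares : List (List Int)) (j : Int) :
    (PySem.List.pyRange 0 (PySem.List.len shares)).foldl
      (fun val i => PySem.Int.bxor val (PySem.List.pyGetD (PySem.List.pyGetD shares i []) j 0)) 0
    = shares.foldl (fun val row => PySem.Int.bxor val (PySem.List.pyGetD row j 0)) 0 := by
  simpa using PySem.List.foldl_pyRange_pyGetD shares []
    (fun val row => PySem.Int.bxor val (PySem.List.pyGetD row j 0)) 0 (le_refl 0)

-- One step of B's accumulator loop on a vector indexed by pyRange 0 n.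
theorem xor_step_eq (n : Nat) (f : Int → Int) (row : List Int) :
    (PySem.List.pyRange 0 (PySem.List.len ((PySem.List.pyRange 0 (n : Int)).map f))).map
      (fun j => PySem.Int.bxor (PySem.List.pyGetD ((PySem.List.pyRange 0 (n : Int)).map f) j 0)
                               (PySem.List.pyGetD row j 0))
    = (PySem.List.pyRange 0 (n : Int)).map
        (fun j => PySem.Int.bxor (f j) (PySem.List.pyGetD row j 0)) := by
  have hlen : PySem.List.len ((PySem.List.pyRange 0 (n : Int)).map f) = (n : Int) := by
    simp [PySem.List.len, PySem.List.pyRange_zero_natCast]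
  rw [hlen]
  refine List.map_congr_left ?_
  intro j hj
  rw [PySem.List.pyRange_zero_natCast] at hj
  obtain ⟨k, hk, rfl⟩ := List.mem_map.mp hj
  rw [PySem.List.pyGetD_map_pyRange f n k 0 (List.mem_range.mp hk)]

-- B's fold over the remaining rows, with the accumulator kept as a map over pyRange 0 n.
theorem xor_fold_inv (rest : List (List Int)) (n : Nat) (f : Int → Int) :
    rest.foldl
      (fun acc row =>
        (PySem.List.pyRange 0 (PySem.List.len acc)).map
          (fun j => PySem.Int.bxor (PySem.List.pyGetD acc j 0) (PySem.List.pyGetD row j 0)))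
      ((PySem.List.pyRange 0 (n : Int)).map f)
    = (PySem.List.pyRange 0 (n : Int)).map
        (fun j => rest.foldl (fun v row => PySem.Int.bxor v (PySem.List.pyGetD row j 0)) (f j)) := by
  induction rest generalizing f with
  | nil => simp
  | cons row rest ih =>
    simp only [List.foldl_cons]
    rw [xor_step_eq n f row, ih]

-- ===== VERDICT (by name: the statement is the Claim_ definition above) =====
theorem xor_combine_spec : Claim_equal_xor_combine := by
  intro shares _ _
  unfold Spec_xor_combine
  cases shares with
  | nil => rfl
  | cons first rest =>
    simp only [xor_combine, xor_combine_alt]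
    rw [if_neg (by simp : ¬ (first :: rest).length = 0)]
    have h0 : PySem.List.pyGetD (first :: rest) 0 [] = first := by
      simp [PySem.List.pyGetD, PySem.List.pyGet?, PySem.List.pyIdx?]
    rw [h0, PySem.List.foldl_append_singleton_eq_map]
    have hlen : PySem.List.len first = ((first.length : Nat) : Int) := by
      simp [PySem.List.len]
    rw [hlen, xor_fold_inv rest first.length (fun j => PySem.List.pyGetD first j 0)]
    simp only [List.nil_append]
    refine List.map_congr_left ?_
    intro j _
    rw [xor_inner_eq (first :: rest) j, List.foldl_cons,
      PySem.Int.bxor_comm 0 (PySem.List.pyGetD first j 0), PySem.Int.bxor_zero]
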